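-- pv_equiv track=rewrite | github.com/Jrap-bit/CipherGuard | cryptoserver/encryptApi/hill_cipher.py | convert_cipher_to_matrix
-- ===== SOURCE A (Python) =====
-- def convert_cipher_to_matrix(function_cipher, pair):
--     cipher_matrix_func = []
--     temp_func = []
--     if len(function_cipher) % pair != 0:
--         for i in range(pair - len(function_cipher) % pair):
--             function_cipher += 'X'
--     for i in range(0, len(function_cipher), pair):
--         for j in range(pair):
--             temp_func.append([ord(function_cipher[i + j]) - 65])
--     for i in range(len(function_cipher) // pair):
--         cipher_matrix_func.append(temp_func[(pair * i):(pair * i) + pair])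
--     return cipher_matrix_func
-- ===== SOURCE B (Python) =====
-- def convert_cipher_to_matrix(function_cipher, pair):
--     # Single streaming pass: accumulate one row at a time, flush when full,
--     # and pad the final short row directly with the code of 'X'.
--     cipher_matrix = []
--     row = []
--     for ch in function_cipher:
--         row.append([ord(ch) - 65])
--         if len(row) == pair:
--             cipher_matrix.append(row)
--             row = []
--     if row:
--         while len(row) < pair:
--             row.append([ord('X') - 65])
--         cipher_matrix.append(row)
--     return cipher_matrix
-- ===== Notes on version B (the rewrite author's own statement) =====
-- stated objective: alternative
-- what changed: A pads the string with an appending loop, fills a flat temp list of [code] vectors via a nested index double loop over ranges, then regroups temp into chunks with a third slicing loop; B is a single streaming pass with a row accumulator: it appends [ord(c)-65] to the current row, flushes the row whenever it reaches length pair, and pads only the final short row directly with [ord('X')-65] codes - no string padding, no indices, no slices, no intermediate flat list.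
-- outside the precondition, e.g. on convert_cipher_to_matrix('AB', -2): A returns [], B returns [[[0], [1]]]
import Mathlib
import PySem

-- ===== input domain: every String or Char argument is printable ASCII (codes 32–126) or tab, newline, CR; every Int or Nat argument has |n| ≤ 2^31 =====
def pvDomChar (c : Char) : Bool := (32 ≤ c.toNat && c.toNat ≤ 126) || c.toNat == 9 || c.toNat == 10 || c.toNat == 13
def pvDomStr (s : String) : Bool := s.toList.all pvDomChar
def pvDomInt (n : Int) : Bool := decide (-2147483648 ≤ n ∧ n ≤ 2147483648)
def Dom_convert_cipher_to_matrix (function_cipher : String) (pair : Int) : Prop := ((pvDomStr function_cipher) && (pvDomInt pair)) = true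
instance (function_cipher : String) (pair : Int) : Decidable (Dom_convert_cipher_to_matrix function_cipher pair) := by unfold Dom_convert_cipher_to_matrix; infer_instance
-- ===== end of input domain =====

-- B replaces A's three passes (pad loop, flat temp list via nested index loops, regroup-by-slices
-- loop) by a single streaming pass with a row accumulator that flushes full rows and pads only the
-- final short row; objective: alternative (same O(n) cost, different algorithm).


-- ===== PORT A =====
def convert_cipher_to_matrix (function_cipher : String) (pair : Int) : List (List (List Int)) :=
  let s0 := function_cipher.toList
  -- if len(function_cipher) % pair != 0: for i in range(pair - len % pair): function_cipher += 'X'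
  let s := if PySem.Int.mod (s0.length : Int) pair ≠ 0 then
      (PySem.List.pyRange 0 (pair - PySem.Int.mod (s0.length : Int) pair) 1).foldl
        (fun acc _ => acc ++ ['X']) s0
    else s0
  -- for i in range(0, len, pair): for j in range(pair): temp.append([ord(s[i+j]) - 65])
  let temp := (PySem.List.pyRange 0 (s.length : Int) pair).foldl
    (fun tempAcc i => (PySem.List.pyRange 0 pair 1).foldl
      (fun tempAcc2 j => tempAcc2 ++ [[((PySem.List.pyGetD s (i + j) 'X').toNat : Int) - 65]]) tempAcc) []
  -- for i in range(len // pair): result.append(temp[pair*i : pair*i + pair])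
  (PySem.List.pyRange 0 (PySem.Int.floordiv (s.length : Int) pair) 1).foldl
    (fun acc i => acc ++ [PySem.List.slice temp (some (pair * i)) (some (pair * i + pair))]) []

-- ===== PORT B =====
def convert_cipher_to_matrix_alt (function_cipher : String) (pair : Int) : List (List (List Int)) :=
  -- single pass: row accumulator, flushed when len(row) == pair
  let st := function_cipher.toList.foldl
    (fun (st : List (List (List Int)) × List (List Int)) c =>
      let row := st.2 ++ [[((c.toNat : Int)) - 65]]
      if (row.length : Int) = pair then (st.1 ++ [row], []) else (st.1, row))
    ([], [])
  if st.2 ≠ [] then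
    -- while len(row) < pair: row.append([ord('X') - 65])  — appends (pair - len(row)) copies (none if pair ≤ len(row))
    st.1 ++ [st.2 ++ List.replicate (pair - (st.2.length : Int)).toNat [(23 : Int)]]
  else st.1

-- ===== PRECONDITION & SPEC =====
-- Pre_ restricts to the natural domain 0 < pair: at pair = 0 the Python A raises ZeroDivisionError
-- (len % pair), and for pair < 0 (a negative chunk size no caller would pass) A's [] is an artefact
-- of its three ranges all being empty, while B's streaming pass never flushes a row there.
def Pre_convert_cipher_to_matrix (function_cipher : String) (pair : Int) : Prop := 0 < pair
instance (function_cipher : String) (pair : Int) : Decidable (Pre_convert_cipher_to_matrix function_cipher pair) := by unfold Pre_convert_cipher_to_matrix; infer_instance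
def pvWitness_convert_cipher_to_matrix : String × Int := ("ABCDE", 2)
def Spec_convert_cipher_to_matrix (function_cipher : String) (pair : Int) (out : List (List (List Int))) : Prop := out = convert_cipher_to_matrix_alt function_cipher pair
instance (function_cipher : String) (pair : Int) (out : List (List (List Int))) : Decidable (Spec_convert_cipher_to_matrix function_cipher pair out) := by unfold Spec_convert_cipher_to_matrix; infer_instance

-- ===== CLAIM (what is proved, stated in full; the proofs are below) =====
def Claim_equal_convert_cipher_to_matrix : Prop := ∀ (function_cipher : String) (pair : Int), Dom_convert_cipher_to_matrix function_cipher pair → Pre_convert_cipher_to_matrix function_cipher pair → Spec_convert_cipher_to_matrix function_cipher pair (convert_cipher_to_matrix function_cipher pair)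

-- ===== LEMMAS AND PROOFS =====

-- A-side: the padding loop is an append of replicated 'X'
theorem pad_loop_eq (s0 : List Char) (k : Int) :
    (PySem.List.pyRange 0 k 1).foldl (fun acc _ => acc ++ ['X']) s0
      = s0 ++ List.replicate k.toNat 'X' := by
  rw [PySem.List.foldl_append_singleton_eq_map (f := fun _ => 'X')]
  simp [List.map_const', PySem.List.length_pyRange_one]

theorem padded_dvd (s0 : List Char) (p : Int) (hp : 0 < p) :
    p ∣ (((if PySem.Int.mod (s0.length : Int) p ≠ 0
        then s0 ++ List.replicate (p - PySem.Int.mod (s0.length : Int) p).toNat 'X'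
        else s0).length : Int)) := by
  by_cases hm : PySem.Int.mod (s0.length : Int) p = 0
  · simp only [hm, ne_eq, not_true_eq_false, if_neg, not_false_eq_true]
    exact (PySem.Int.mod_eq_zero_iff_dvd _ _).mp hm
  · rw [if_pos hm]
    have h0 := PySem.Int.mod_nonneg (a := (s0.length : Int)) hp
    have h1 := PySem.Int.mod_lt (a := (s0.length : Int)) hp
    have h2 := PySem.Int.floordiv_mul_add_mod (s0.length : Int) p
    refine ⟨PySem.Int.floordiv (s0.length : Int) p + 1, ?_⟩
    rw [List.length_append, List.length_replicate]
    push_cast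
    rw [Int.toNat_of_nonneg (by omega)]
    nlinarith

theorem floordiv_of_dvd (n p c : Int) (hp : 0 < p) (hc : n = p * c) :
    PySem.Int.floordiv n p = c := by
  rw [PySem.Int.floordiv_eq_iff_of_pos hp]; constructor <;> nlinarith

theorem range_flat_tiles (p : Int) (hp : 0 < p) (Q : Int) (hQ : 0 ≤ Q) :
    (PySem.List.pyRange 0 Q 1).flatMap (fun k => PySem.List.pyRange (p * k) (p * k + p) 1)
      = PySem.List.pyRange 0 (p * Q) 1 := by
  induction Q, hQ using Int.le_induction with
  | base => simp [PySem.List.pyRange_one_eq_nil]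
  | succ Q hQ' ih =>
      rw [PySem.List.pyRange_one_succ_right (a := 0) (b := Q) (by omega), List.flatMap_append, ih]
      simp only [List.flatMap_cons, List.flatMap_nil, List.append_nil]
      rw [← PySem.List.pyRange_one_append 0 (p * Q) (p * Q + p) (by positivity) (by nlinarith)]
      ring_nf

theorem starts_eq (n p : Int) (hp : 0 < p) (hn : 0 ≤ n) (hdvd : p ∣ n) :
    PySem.List.pyRange 0 n p
      = (List.range (PySem.Int.floordiv n p).toNat).map (fun k : Nat => p * (k : Int)) := by
  obtain ⟨c, hc⟩ := hdvd
  have hc0 : 0 ≤ c := by nlinarith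
  rw [floordiv_of_dvd n p c hp hc, PySem.List.pyRange_of_pos _ _ hp]
  by_cases h0 : 0 < n
  · rw [if_pos h0]
    have : ((n - 0 + p - 1) / p) = c := by
      rw [show n - 0 + p - 1 = (p - 1) + c * p by rw [hc]; ring]
      rw [Int.add_mul_ediv_right _ _ (by omega), Int.ediv_eq_zero_of_lt (by omega) (by omega)]
      omega
    rw [this]; simp
  · have hn0 : n = 0 := by omega
    have hcz : c = 0 := by nlinarith
    simp [if_neg h0, hcz]

theorem inner_map_eq (t : List Char) (p i : Int) :
    (PySem.List.pyRange 0 p 1).map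
        (fun j => [((PySem.List.pyGetD t (i + j) 'X').toNat : Int) - 65])
      = (PySem.List.pyRange i (i + p) 1).map
        (fun idx => [((PySem.List.pyGetD t idx 'X').toNat : Int) - 65]) := by
  rw [PySem.List.pyRange_one 0 p, PySem.List.pyRange_one i (i + p)]
  simp [List.map_map, Function.comp_def]

theorem slice_map_comm {α β : Type} (f : α → β) (xs : List α) (a b : Int)
    (ha : 0 ≤ a) (hb : 0 ≤ b) :
    PySem.List.slice (xs.map f) (some a) (some b) = (PySem.List.slice xs (some a) (some b)).map f := by
  rw [PySem.List.slice_toNat _ ha hb, PySem.List.slice_toNat _ ha hb]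
  simp [List.map_drop, List.map_take]

theorem temp_eq (t : List Char) (p : Int) (hp : 0 < p) (hdvd : p ∣ (t.length : Int)) :
    (PySem.List.pyRange 0 (t.length : Int) p).foldl
      (fun tempAcc i => (PySem.List.pyRange 0 p 1).foldl
        (fun tempAcc2 j => tempAcc2 ++ [[((PySem.List.pyGetD t (i + j) 'X').toNat : Int) - 65]]) tempAcc) []
    = t.map (fun c => [((c.toNat : Int)) - 65]) := by
  have hn : (0:Int) ≤ (t.length : Int) := by positivity
  obtain ⟨c, hc⟩ := hdvd
  have hQ := floordiv_of_dvd _ p c hp hc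
  simp only [PySem.List.foldl_append_singleton_eq_map]
  rw [PySem.List.foldl_append_eq_flatMap]
  rw [List.nil_append]
  rw [starts_eq _ p hp hn ⟨c, hc⟩]
  rw [List.flatMap_map]
  simp only [inner_map_eq t p]
  calc (List.range (PySem.Int.floordiv (t.length:Int) p).toNat).flatMap
          (fun k : Nat => (PySem.List.pyRange (p * (k:Int)) (p * (k:Int) + p) 1).map
            (fun idx => [((PySem.List.pyGetD t idx 'X').toNat : Int) - 65]))
      = (PySem.List.pyRange 0 (PySem.Int.floordiv (t.length:Int) p) 1).flatMap
          (fun k => (PySem.List.pyRange (p * k) (p * k + p) 1).map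
            (fun idx => [((PySem.List.pyGetD t idx 'X').toNat : Int) - 65])) := by
          rw [PySem.List.pyRange_one]
          simp [List.flatMap_map]
    _ = ((PySem.List.pyRange 0 (PySem.Int.floordiv (t.length:Int) p) 1).flatMap
          (fun k => PySem.List.pyRange (p * k) (p * k + p) 1)).map
            (fun idx => [((PySem.List.pyGetD t idx 'X').toNat : Int) - 65]) := by
          rw [List.map_flatMap]
    _ = t.map (fun c => [((c.toNat : Int)) - 65]) := by
          rw [range_flat_tiles p hp _ (by rw [hQ]; nlinarith)]
          rw [show p * PySem.Int.floordiv (t.length:Int) p = (t.length : Int) by rw [hQ]; omega]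
          have := PySem.List.map_pyGetD_pyRange_zero' t 'X'
          calc (PySem.List.pyRange 0 (t.length:Int) 1).map (fun idx => [((PySem.List.pyGetD t idx 'X').toNat : Int) - 65])
              = ((PySem.List.pyRange 0 (t.length:Int) 1).map (fun j => PySem.List.pyGetD t j 'X')).map
                  (fun c => [((c.toNat : Int)) - 65]) := by rw [List.map_map]; simp [Function.comp_def]
            _ = t.map (fun c => [((c.toNat : Int)) - 65]) := by rw [this]

theorem core_eq (t : List Char) (p : Int) (hp : 0 < p) (hdvd : p ∣ (t.length : Int)) :
    (PySem.List.pyRange 0 (PySem.Int.floordiv (t.length : Int) p) 1).foldl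
      (fun acc i => acc ++ [PySem.List.slice
        ((PySem.List.pyRange 0 (t.length : Int) p).foldl
          (fun tempAcc i => (PySem.List.pyRange 0 p 1).foldl
            (fun tempAcc2 j => tempAcc2 ++ [[((PySem.List.pyGetD t (i + j) 'X').toNat : Int) - 65]]) tempAcc) [])
        (some (p * i)) (some (p * i + p))]) []
    = (PySem.List.pyRange 0 (t.length : Int) p).map
        (fun i => (PySem.List.slice t (some i) (some (i + p))).map (fun c => [((c.toNat : Int)) - 65])) := by
  have hn : (0:Int) ≤ (t.length : Int) := by positivity
  rw [temp_eq t p hp hdvd]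
  rw [PySem.List.foldl_append_singleton_eq_map
    (f := fun i => PySem.List.slice (t.map (fun c => [((c.toNat : Int)) - 65])) (some (p * i)) (some (p * i + p)))]
  rw [List.nil_append, starts_eq _ p hp hn hdvd, PySem.List.pyRange_one, List.map_map, List.map_map]
  rw [show PySem.Int.floordiv (t.length:Int) p - 0 = PySem.Int.floordiv (t.length:Int) p by ring]
  apply List.map_congr_left
  intro k _
  simp only [Function.comp_def]
  rw [show (0:Int) + (k:Int) = (k:Int) by ring]
  rw [slice_map_comm _ t (p * (k:Int)) (p * (k:Int) + p) (by positivity) (by positivity)]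

-- B-side proof machinery: chunks-and-remainder of a list (full chunks of size p, plus leftover)
def pvFCRM {α : Type} (p : Nat) (u : List α) : List (List α) × List α :=
  if h : p ≠ 0 ∧ p ≤ u.length then
    let r := pvFCRM p (u.drop p)
    (u.take p :: r.1, r.2)
  else ([], u)
termination_by u.length
decreasing_by simp only [List.length_drop]; omega

theorem pvFCRM_small {α : Type} (p : Nat) (u : List α) (h : u.length < p) :
    pvFCRM p u = ([], u) := by
  rw [pvFCRM, dif_neg]; omega

theorem pvFCRM_cons {α : Type} (p : Nat) (hp : p ≠ 0) (r v : List α) (hr : r.length = p) :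
    pvFCRM p (r ++ v) = (r :: (pvFCRM p v).1, (pvFCRM p v).2) := by
  rw [pvFCRM, dif_pos ⟨hp, by simp [hr]⟩]
  rw [List.take_left' hr, List.drop_left' hr]

theorem pvFCRM_rem_length {α : Type} (p : Nat) (hp : p ≠ 0) (u : List α) :
    (pvFCRM p u).2.length = u.length % p := by
  rw [pvFCRM]
  by_cases h : p ≠ 0 ∧ p ≤ u.length
  · rw [dif_pos h]
    have ih := pvFCRM_rem_length p hp (u.drop p)
    simp only [ih, List.length_drop]
    conv_rhs => rw [show u.length = (u.length - p) + p by omega]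
    rw [Nat.add_mod_right]
  · rw [dif_neg h]
    rcases not_and_or.mp h with h' | h'
    · exact absurd hp h'
    · have hlt : u.length < p := by omega
      simp [Nat.mod_eq_of_lt hlt]
termination_by u.length
decreasing_by simp only [List.length_drop]; omega

theorem pvFCRM_fill {α : Type} (p : Nat) (hp : p ≠ 0) (u w : List α)
    (h : (pvFCRM p u).2.length + w.length = p) :
    pvFCRM p (u ++ w) = ((pvFCRM p u).1 ++ [(pvFCRM p u).2 ++ w], []) := by
  by_cases hlen : p ≤ u.length
  · have hu : u = u.take p ++ u.drop p := (List.take_append_drop p u).symm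
    have htk : (u.take p).length = p := by simp [List.length_take]; omega
    have heq : pvFCRM p u = ((u.take p) :: (pvFCRM p (u.drop p)).1, (pvFCRM p (u.drop p)).2) := by
      conv_lhs => rw [hu]
      exact pvFCRM_cons p hp _ _ htk
    have ih := pvFCRM_fill p hp (u.drop p) w (by rw [heq] at h; exact h)
    conv_lhs => rw [hu, List.append_assoc]
    rw [pvFCRM_cons p hp _ _ htk, ih, heq]
    simp
  · have hsmall : u.length < p := by omega
    rw [pvFCRM_small p u hsmall] at h ⊢
    simp only at h
    have hlen2 : (u ++ w).length = p := by simp only [List.length_append]; omega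
    rw [pvFCRM, dif_pos ⟨hp, hlen2.ge⟩]
    rw [List.take_of_length_le hlen2.le, List.drop_of_length_le hlen2.le]
    rw [pvFCRM_small p ([] : List α) (by simp only [List.length_nil]; omega)]
    simp
termination_by u.length
decreasing_by simp only [List.length_drop]; omega

-- the streaming fold computes exactly (full chunks, leftover row)
theorem fold_inv (p : Int) (hp : 0 < p) (s : List Char) :
    ∀ (out : List (List (List Int))) (row : List (List Int)), row.length < p.toNat →
    s.foldl (fun (st : List (List (List Int)) × List (List Int)) c =>
        let r := st.2 ++ [[((c.toNat : Int)) - 65]]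
        if (r.length : Int) = p then (st.1 ++ [r], []) else (st.1, r))
      (out, row)
    = (out ++ (pvFCRM p.toNat (row ++ s.map (fun c => [((c.toNat : Int)) - 65]))).1,
       (pvFCRM p.toNat (row ++ s.map (fun c => [((c.toNat : Int)) - 65]))).2) := by
  induction s with
  | nil =>
      intro out row hrow
      simp [pvFCRM_small p.toNat row hrow]
  | cons c s ih =>
      intro out row hrow
      simp only [List.foldl_cons, List.map_cons]
      have hassoc : row ++ ([((c.toNat : Int)) - 65] :: s.map (fun c => [((c.toNat : Int)) - 65]))
          = (row ++ [[((c.toNat : Int)) - 65]]) ++ s.map (fun c => [((c.toNat : Int)) - 65]) := by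
        simp
      rw [hassoc]
      by_cases hfull : (((row ++ [[((c.toNat : Int)) - 65]]).length : Int)) = p
      · simp only [hfull, if_pos, ite_true]
        have hlen : (row ++ [[((c.toNat : Int)) - 65]]).length = p.toNat := by omega
        rw [ih (out ++ [row ++ [[((c.toNat : Int)) - 65]]]) [] (by simp only [List.length_nil]; omega)]
        rw [pvFCRM_cons p.toNat (by omega) _ _ hlen]
        simp
      · simp only [hfull, ite_false, if_neg]
        have hlt : (row ++ [[((c.toNat : Int)) - 65]]).length < p.toNat := by
          simp only [List.length_append, List.length_cons, List.length_nil] at *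
          omega
        exact ih out _ hlt

theorem mod_toNat (n : Nat) (p : Int) (hp : 0 < p) :
    PySem.Int.mod (n : Int) p = ((n % p.toNat : Nat) : Int) := by
  conv_lhs => rw [show p = ((p.toNat : Nat) : Int) by rw [Int.toNat_of_nonneg hp.le]]
  rw [PySem.Int.mod_natCast]

theorem slice_shift (t : List Char) (p : Int) (hp : 0 < p) (k : Nat) :
    PySem.List.slice t (some (p * ((k : Int) + 1))) (some (p * ((k : Int) + 1) + p))
      = PySem.List.slice (t.drop p.toNat) (some (p * (k : Int))) (some (p * (k : Int) + p)) := by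
  have ha : (0:Int) ≤ p * (k : Int) := by positivity
  obtain ⟨a, hA⟩ : ∃ a : Nat, p * (k : Int) = (a : Int) := ⟨(p * (k:Int)).toNat, (Int.toNat_of_nonneg ha).symm⟩
  obtain ⟨b, hB⟩ : ∃ b : Nat, p = (b : Int) := ⟨p.toNat, (Int.toNat_of_nonneg hp.le).symm⟩
  rw [PySem.List.slice_toNat _ (by positivity) (by positivity),
      PySem.List.slice_toNat _ ha (by positivity)]
  rw [List.drop_drop]
  have h1 : (p * ((k : Int) + 1)).toNat = a + b := by
    rw [show p * ((k : Int) + 1) = p * (k : Int) + p by ring, hA, hB, ← Nat.cast_add,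
        Int.toNat_natCast]
  have h2 : (p * ((k : Int) + 1) + p).toNat = a + b + b := by
    rw [show p * ((k : Int) + 1) + p = p * (k : Int) + p + p by ring, hA, hB, ← Nat.cast_add,
        ← Nat.cast_add, Int.toNat_natCast]
  have h3 : (p * (k : Int)).toNat = a := by rw [hA, Int.toNat_natCast]
  have h4 : (p * (k : Int) + p).toNat = a + b := by
    rw [hA, hB, ← Nat.cast_add, Int.toNat_natCast]
  have h5 : p.toNat = b := by rw [hB, Int.toNat_natCast]
  rw [h1, h2, h3, h4, h5]
  rw [show a + b + b - (a + b) = b by omega, show a + b - a = b by omega,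
      Nat.add_comm b a]

theorem mapSlices_eq_FC (p : Int) (hp : 0 < p) :
    ∀ (q : Nat) (t : List Char), t.length = p.toNat * q →
    (List.range q).map (fun k : Nat =>
        (PySem.List.slice t (some (p * (k : Int))) (some (p * (k : Int) + p))).map
          (fun c => [((c.toNat : Int)) - 65]))
      = (pvFCRM p.toNat (t.map (fun c => [((c.toNat : Int)) - 65]))).1 := by
  intro q
  induction q with
  | zero =>
      intro t ht
      have : t = [] := List.eq_nil_of_length_eq_zero (by omega)
      subst this
      rw [List.map_nil, pvFCRM_small p.toNat ([] : List (List Int)) (by simp only [List.length_nil]; omega)]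
      simp
  | succ q ih =>
      intro t ht
      have hple : p.toNat ≤ t.length := by
        rw [ht, Nat.mul_succ]; omega
      rw [List.range_succ_eq_map]
      simp only [List.map_cons, List.map_map]
      rw [pvFCRM, dif_pos ⟨by omega, by simpa using hple⟩]
      simp only
      congr 1
      · rw [show p * ((0:Nat) : Int) = (0:Int) by simp, zero_add,
            PySem.List.slice_toNat _ le_rfl hp.le]
        simp [List.map_take, List.map_drop]
      · have hlen' : (t.drop p.toNat).length = p.toNat * q := by
          simp only [List.length_drop, ht, Nat.mul_succ]; omega
        have hdrop : (t.map (fun c => [((c.toNat : Int)) - 65])).drop p.toNat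
            = (t.drop p.toNat).map (fun c => [((c.toNat : Int)) - 65]) := by
          rw [List.map_drop]
        rw [hdrop, ← ih (t.drop p.toNat) hlen']
        apply List.map_congr_left
        intro k _
        simp only [Function.comp_def]
        rw [show ((Nat.succ k : Nat) : Int) = (k : Int) + 1 by push_cast; ring]
        rw [slice_shift t p hp k]

-- B's port equals the chunk decomposition of the padded string, as does A's
theorem alt_eq (fc : String) (p : Int) (hp : 0 < p) :
    convert_cipher_to_matrix_alt fc p
      = (pvFCRM p.toNat
          ((if PySem.Int.mod ((fc.toList.length : Nat) : Int) p ≠ 0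
            then fc.toList ++ List.replicate (p - PySem.Int.mod ((fc.toList.length : Nat) : Int) p).toNat 'X'
            else fc.toList).map (fun c => [((c.toNat : Int)) - 65]))).1 := by
  unfold convert_cipher_to_matrix_alt
  rw [fold_inv p hp fc.toList [] [] (by simp only [List.length_nil]; omega)]
  simp only [List.nil_append]
  have hrem := pvFCRM_rem_length p.toNat (by omega)
    (fc.toList.map (fun c => [((c.toNat : Int)) - 65]))
  have hulen : (fc.toList.map (fun c => [((c.toNat : Int)) - 65])).length = fc.toList.length := by
    simp
  have hmodeq := mod_toNat fc.toList.length p hp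
  by_cases hm : PySem.Int.mod ((fc.toList.length : Nat) : Int) p = 0
  · -- no padding: the remainder row is empty, nothing is flushed at the end
    have hmod : fc.toList.length % p.toNat = 0 := by
      rw [hmodeq] at hm
      omega
    have hremnil : (pvFCRM p.toNat (fc.toList.map (fun c => [((c.toNat : Int)) - 65]))).2 = [] := by
      apply List.eq_nil_of_length_eq_zero
      rw [hrem, hulen, hmod]
    rw [if_neg (not_not_intro hremnil), if_neg (not_not_intro hm)]
  · -- padding: the remainder row has length m = len % p and is filled to p with [23]'s
    have hmlt : PySem.Int.mod ((fc.toList.length : Nat) : Int) p < p :=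
      PySem.Int.mod_lt (a := ((fc.toList.length : Nat) : Int)) hp
    have hmnn : 0 ≤ PySem.Int.mod ((fc.toList.length : Nat) : Int) p :=
      PySem.Int.mod_nonneg (a := ((fc.toList.length : Nat) : Int)) hp
    have hremlen : (((pvFCRM p.toNat (fc.toList.map (fun c => [((c.toNat : Int)) - 65]))).2.length : Nat) : Int)
        = PySem.Int.mod ((fc.toList.length : Nat) : Int) p := by
      rw [hrem, hulen, hmodeq]
    have hr0 : (pvFCRM p.toNat (fc.toList.map (fun c => [((c.toNat : Int)) - 65]))).2.length ≠ 0 := by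
      rw [hrem, hulen]
      omega
    have hremne : (pvFCRM p.toNat (fc.toList.map (fun c => [((c.toNat : Int)) - 65]))).2 ≠ [] := by
      intro hnil
      exact hr0 (by rw [hnil]; rfl)
    rw [if_pos hremne, if_pos hm]
    have hmapX : (List.replicate (p - PySem.Int.mod ((fc.toList.length : Nat) : Int) p).toNat 'X').map
        (fun c => [((c.toNat : Int)) - 65])
        = List.replicate (p - PySem.Int.mod ((fc.toList.length : Nat) : Int) p).toNat [(23 : Int)] := by
      rw [List.map_replicate, show [((('X'.toNat : Int)) - 65)] = [(23 : Int)] by decide]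
    rw [List.map_append, hmapX]
    rw [pvFCRM_fill p.toNat (by omega) _ _ (by
      rw [List.length_replicate]
      omega)]
    rw [show (p - ((pvFCRM p.toNat (fc.toList.map (fun c => [((c.toNat : Int)) - 65]))).2.length : Int)).toNat
        = (p - PySem.Int.mod ((fc.toList.length : Nat) : Int) p).toNat by rw [hremlen]]

theorem a_eq (fc : String) (p : Int) (hp : 0 < p) :
    convert_cipher_to_matrix fc p
      = (pvFCRM p.toNat
          ((if PySem.Int.mod ((fc.toList.length : Nat) : Int) p ≠ 0
            then fc.toList ++ List.replicate (p - PySem.Int.mod ((fc.toList.length : Nat) : Int) p).toNat 'X'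
            else fc.toList).map (fun c => [((c.toNat : Int)) - 65]))).1 := by
  unfold convert_cipher_to_matrix
  simp only [pad_loop_eq]
  set t := (if PySem.Int.mod ((fc.toList.length : Nat) : Int) p ≠ 0
      then fc.toList ++ List.replicate (p - PySem.Int.mod ((fc.toList.length : Nat) : Int) p).toNat 'X'
      else fc.toList) with ht
  have hdvd : p ∣ (t.length : Int) := ht ▸ padded_dvd fc.toList p hp
  rw [core_eq t p hp hdvd]
  obtain ⟨c, hc⟩ := hdvd
  have hc0 : 0 ≤ c := by nlinarith [hc, Int.natCast_nonneg t.length]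
  have hlen : t.length = p.toNat * c.toNat := by
    have : ((p.toNat * c.toNat : Nat) : Int) = (t.length : Int) := by
      push_cast
      rw [Int.toNat_of_nonneg hp.le, Int.toNat_of_nonneg hc0]
      omega
    omega
  rw [starts_eq _ p hp (by positivity) ⟨c, hc⟩, floordiv_of_dvd _ p c hp hc, List.map_map]
  rw [← mapSlices_eq_FC p hp c.toNat t hlen]
  apply List.map_congr_left
  intro k _
  simp [Function.comp_def]

-- ===== VERDICT (by name: the statements are the Claim_ definitions above) =====
theorem convert_cipher_to_matrix_spec : Claim_equal_convert_cipher_to_matrix := by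
  intro fc pair _hdom hpre
  unfold Pre_convert_cipher_to_matrix at hpre
  unfold Spec_convert_cipher_to_matrix
  rw [a_eq fc pair hpre, alt_eq fc pair hpre]
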